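-- pv_equiv track=rewrite | github.com/Eshan05/SemIII-Lab-SPPU | DSL/A/A1Pure.py | cricket_football_not_badminton
-- ===== SOURCE A (Python) =====
-- def cricket_football_not_badminton(cricket, badminton, football):
--   # Returns the number of students who play cricket and football but not badminton.
--   count = 0
--   for i in range(len(cricket)):
--     if cricket[i] in football:
--       found = False
--       for j in range(len(badminton)):
--         if cricket[i] == badminton[j]:
--           found = True
--           break
--       if not found:
--         count += 1
--   return count
-- ===== SOURCE B (Python) =====
-- def cricket_football_not_badminton(cricket, badminton, football):
--   # Sort all three lists once, then count with ONE synchronized merge-style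
--   # pass: two pointers advance monotonically through the sorted football and
--   # badminton lists as we walk the sorted cricket list, so no per-element
--   # membership test of any list is ever performed.
--   cs = sorted(cricket)
--   fs = sorted(football)
--   bs = sorted(badminton)
--   j = 0
--   k = 0
--   count = 0
--   for x in cs:
--     while j < len(fs) and fs[j] < x:
--       j += 1
--     while k < len(bs) and bs[k] < x:
--       k += 1
--     if j < len(fs) and fs[j] == x and not (k < len(bs) and bs[k] == x):
--       count += 1
--   return count
-- ===== Notes on version B (the rewrite author's own statement) =====
-- stated objective: faster
-- what changed: Replaces A's nested membership scans with a sort-then-merge algorithm: all three lists are sorted once and a single synchronized pass with two monotone pointers over sorted football/badminton decides each sorted cricket element, so no membership test remains.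
import Mathlib
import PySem

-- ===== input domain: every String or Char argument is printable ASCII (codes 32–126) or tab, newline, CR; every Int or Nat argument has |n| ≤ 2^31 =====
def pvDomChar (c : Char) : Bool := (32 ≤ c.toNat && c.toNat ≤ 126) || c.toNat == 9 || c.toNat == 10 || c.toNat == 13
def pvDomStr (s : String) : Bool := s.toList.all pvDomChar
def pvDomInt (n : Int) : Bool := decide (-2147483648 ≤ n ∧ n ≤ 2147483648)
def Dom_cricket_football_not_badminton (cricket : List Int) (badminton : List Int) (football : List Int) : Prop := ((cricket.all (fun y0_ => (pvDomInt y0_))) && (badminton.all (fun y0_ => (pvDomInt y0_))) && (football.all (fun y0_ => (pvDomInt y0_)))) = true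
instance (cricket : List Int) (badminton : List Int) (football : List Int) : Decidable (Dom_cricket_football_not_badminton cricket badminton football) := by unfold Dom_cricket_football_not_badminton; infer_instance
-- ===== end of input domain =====

-- B sorts the three lists once and counts in one synchronized merge-style pass with two
-- monotone pointers, instead of A's nested membership scans (faster in a timing run).


-- ===== PORT A =====
-- inner 'for j in range(len(badminton)): if cricket[i] == badminton[j]: found = True; break'
def pvFoundLoop (x : Int) : List Int → Bool
  | [] => false
  | b :: rest => if x == b then true else pvFoundLoop x rest

def cricket_football_not_badminton (cricket : List Int) (badminton : List Int) (football : List Int) : Int :=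
  cricket.foldl (fun count x =>
    if football.contains x then
      (if pvFoundLoop x badminton then count else count + 1)
    else count) 0

-- ===== PORT B =====
-- 'while j < len(l) and l[j] < x: j += 1' (pointer advance over a fixed list)
def pvAdv (l : List Int) (x : Int) (j : Nat) : Nat :=
  if h : j < l.length ∧ l.getD j 0 < x then pvAdv l x (j + 1) else j
termination_by l.length - j
decreasing_by omega

-- 'for x in cs: … ' with pointer/counter state (j, k, count)
def pvMergeLoop (fs bs : List Int) : List Int → Nat → Nat → Int → Int
  | [], _, _, count => count
  | x :: rest, j, k, count =>
    let j' := pvAdv fs x j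
    let k' := pvAdv bs x k
    let count' :=
      if (decide (j' < fs.length) && (fs.getD j' 0 == x))
          && !(decide (k' < bs.length) && (bs.getD k' 0 == x)) then count + 1 else count
    pvMergeLoop fs bs rest j' k' count'

def cricket_football_not_badminton_alt (cricket : List Int) (badminton : List Int) (football : List Int) : Int :=
  let cs := PySem.List.sorted cricket (fun x => x) false
  let fs := PySem.List.sorted football (fun x => x) false
  let bs := PySem.List.sorted badminton (fun x => x) false
  pvMergeLoop fs bs cs 0 0 0

-- ===== PRECONDITION & SPEC =====
def Spec_cricket_football_not_badminton (cricket : List Int) (badminton : List Int) (football : List Int) (out : Int) : Prop := out = cricket_football_not_badminton_alt cricket badminton football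
instance (cricket : List Int) (badminton : List Int) (football : List Int) (out : Int) : Decidable (Spec_cricket_football_not_badminton cricket badminton football out) := by unfold Spec_cricket_football_not_badminton; infer_instance

-- ===== CLAIM (what is proved, stated in full; the proofs are below) =====
def Claim_equal_cricket_football_not_badminton : Prop := ∀ (cricket : List Int) (badminton : List Int) (football : List Int), Dom_cricket_football_not_badminton cricket badminton football → Spec_cricket_football_not_badminton cricket badminton football (cricket_football_not_badminton cricket badminton football)

-- ===== LEMMAS AND PROOFS =====

theorem pvFoundLoop_eq_contains (x : Int) (l : List Int) : pvFoundLoop x l = l.contains x := by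
  induction l with
  | nil => rfl
  | cons b rest ih =>
      by_cases h : x = b <;> simp [pvFoundLoop, h, ih, beq_iff_eq]

-- A's fold computes countP
theorem portA_eq_countP (cricket badminton football : List Int) (a : Int) :
    cricket.foldl (fun count x =>
      if football.contains x then
        (if badminton.contains x then count else count + 1)
      else count) a
    = a + ((cricket.countP (fun x => football.contains x && !badminton.contains x) : Nat) : Int) := by
  induction cricket generalizing a with
  | nil => simp
  | cons x l ih =>
      rw [List.foldl_cons, ih, List.countP_cons]
      by_cases hf : football.contains x = true <;>
        by_cases hb : badminton.contains x = true <;>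
        simp only [hf, hb, Bool.not_true, Bool.not_false, Bool.and_true, Bool.and_false,
          if_true] <;> push_cast <;> omega

-- pvAdv: basic bounds and the frontier properties
theorem pvAdv_spec (l : List Int) (x : Int) (j : Nat) (hj : j ≤ l.length) :
    j ≤ pvAdv l x j ∧ pvAdv l x j ≤ l.length ∧
    (∀ i, j ≤ i → i < pvAdv l x j → l.getD i 0 < x) ∧
    (pvAdv l x j < l.length → ¬ l.getD (pvAdv l x j) 0 < x) := by
  rw [pvAdv]
  by_cases h : j < l.length ∧ l.getD j 0 < x
  · rw [dif_pos h]
    obtain ⟨h1, h2, h3, h4⟩ := pvAdv_spec l x (j + 1) (by omega)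
    refine ⟨by omega, h2, ?_, h4⟩
    intro i hji hilt
    by_cases he : i = j
    · subst he; exact h.2
    · exact h3 i (by omega) hilt
  · rw [dif_neg h]
    refine ⟨le_refl _, hj, fun i h1 h2 => absurd h2 (by omega), fun hlt hcmp => h ⟨hlt, hcmp⟩⟩
termination_by l.length - j
decreasing_by omega

-- on a sorted list with everything below the pointer < x, the merge test decides membership
theorem pvAdv_mem_iff (l : List Int) (x : Int) (j : Nat)
    (hs : l.Pairwise (· ≤ ·)) (hj : j ≤ l.length)
    (hbelow : ∀ i, i < j → l.getD i 0 < x) :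
    ((decide (pvAdv l x j < l.length) && (l.getD (pvAdv l x j) 0 == x)) = l.contains x) := by
  obtain ⟨h1, h2, h3, h4⟩ := pvAdv_spec l x j hj
  set p := pvAdv l x j with hp
  by_cases hm : x ∈ l
  · obtain ⟨i, hil, hix⟩ := List.mem_iff_getElem.mp hm
    have hgd : l.getD i 0 = x := by rw [List.getD_eq_getElem l 0 hil]; exact hix
    have hip : ¬ i < p := by
      intro hlt
      rcases Nat.lt_or_ge i j with hij | hij
      · exact absurd hgd (by have := hbelow i hij; omega)
      · exact absurd hgd (by have := h3 i hij hlt; omega)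
    have hplen : p < l.length := by omega
    have hple : l.getD p 0 ≤ l.getD i 0 := by
      rcases Nat.eq_or_lt_of_le (Nat.le_of_not_lt hip) with he | hlt
      · rw [he]
      · rw [List.getD_eq_getElem l 0 hplen, List.getD_eq_getElem l 0 hil]
        exact List.pairwise_iff_getElem.mp hs p i hplen hil hlt
    have hpx : l.getD p 0 = x := by have := h4 hplen; omega
    have hpx' : l[p] = x := by rw [List.getD_eq_getElem l 0 hplen] at hpx; exact hpx
    simp [hm, hplen, hpx']
  · have : ¬ (p < l.length ∧ l.getD p 0 = x) := by
      rintro ⟨hplen, hpx⟩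
      exact hm (by rw [← hpx, List.getD_eq_getElem l 0 hplen]; exact List.getElem_mem hplen)
    by_cases hplen : p < l.length
    · have hne : ¬ l[p] = x := fun he => this ⟨hplen, by rw [List.getD_eq_getElem l 0 hplen]; exact he⟩
      simp [hm, hplen, hne]
    · simp [hm, hplen]

-- the merge loop counts, over the rest of sorted cricket, the qualifying occurrences
theorem pvMergeLoop_correct (fs bs : List Int)
    (hfs : fs.Pairwise (· ≤ ·)) (hbs : bs.Pairwise (· ≤ ·)) :
    ∀ (cs : List Int) (j k : Nat) (c : Int),
    cs.Pairwise (· ≤ ·) → j ≤ fs.length → k ≤ bs.length →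
    (∀ x ∈ cs, ∀ i, i < j → fs.getD i 0 < x) →
    (∀ x ∈ cs, ∀ i, i < k → bs.getD i 0 < x) →
    pvMergeLoop fs bs cs j k c
      = c + ((cs.countP (fun x => fs.contains x && !bs.contains x) : Nat) : Int) := by
  intro cs
  induction cs with
  | nil => intro j k c _ _ _ _ _; simp [pvMergeLoop]
  | cons x rest ih =>
      intro j k c hsort hj hk hbf hbb
      have hxf := hbf x List.mem_cons_self
      have hxb := hbb x List.mem_cons_self
      obtain ⟨hf1, hf2, hf3, _⟩ := pvAdv_spec fs x j hj
      obtain ⟨hb1, hb2, hb3, _⟩ := pvAdv_spec bs x k hk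
      have hxle : ∀ y ∈ rest, x ≤ y := fun y hy => (List.pairwise_cons.mp hsort).1 y hy
      have hmf := pvAdv_mem_iff fs x j hfs hj hxf
      have hmb := pvAdv_mem_iff bs x k hbs hk hxb
      rw [pvMergeLoop]
      simp only [hmf, hmb]
      rw [ih (pvAdv fs x j) (pvAdv bs x k) _ (List.pairwise_cons.mp hsort).2 hf2 hb2
          (fun y hy i hi => by
            rcases Nat.lt_or_ge i j with hij | hij
            · exact lt_of_lt_of_le (hxf i hij) (hxle y hy)
            · exact lt_of_lt_of_le (hf3 i hij hi) (hxle y hy))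
          (fun y hy i hi => by
            rcases Nat.lt_or_ge i k with hik | hik
            · exact lt_of_lt_of_le (hxb i hik) (hxle y hy)
            · exact lt_of_lt_of_le (hb3 i hik hi) (hxle y hy)),
         List.countP_cons]
      by_cases hq : (fs.contains x && !bs.contains x) = true
      · rw [if_pos hq, if_pos hq]; push_cast; ring
      · rw [if_neg hq, if_neg hq]; push_cast; ring

-- ===== VERDICT (by name: the statement is the Claim_ definition above) =====
theorem cricket_football_not_badminton_spec : Claim_equal_cricket_football_not_badminton := by
  intro cricket badminton football _
  unfold Spec_cricket_football_not_badminton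
  unfold cricket_football_not_badminton cricket_football_not_badminton_alt
  simp only [pvFoundLoop_eq_contains]
  rw [portA_eq_countP]
  rw [pvMergeLoop_correct _ _ (PySem.List.sorted_pairwise football (fun x => x))
        (PySem.List.sorted_pairwise badminton (fun x => x)) _ 0 0 0
        (PySem.List.sorted_pairwise cricket (fun x => x))
        (Nat.zero_le _) (Nat.zero_le _)
        (fun _ _ i hi => absurd hi (Nat.not_lt_zero i))
        (fun _ _ i hi => absurd hi (Nat.not_lt_zero i))]
  have hperm : (PySem.List.sorted cricket (fun x => x) false).Perm cricket :=
    PySem.List.sorted_perm cricket (fun x => x) false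
  rw [hperm.countP_eq]
  congr 2
  refine List.countP_congr (fun x hx => ?_)
  simp [PySem.List.mem_sorted]
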